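-- pv_equiv track=rewrite | github.com/aus10y/battleship | battleship/battleship.py | _points_along_vector
-- ===== SOURCE A (Python) =====
-- from typing import Callable, Dict, Generator, Iterable, Set, Tuple, List, Type, Union
--
-- Point = Tuple[int, int]
--
-- def _points_along_vector(point: Point, other: Point, length: int) -> List[Point]:
--     row, col = point
--     other_row, other_col = other
--
--     points = []
--
--     # Guard against the same point being passed for both args.
--     if point == other:
--         return []
--
--     # Assume that the points are neighbors and share a border (but never an edge).
--     row_change = row != other_row
--     if row_change:
--         delta = other_row - row
--         points = [(other_row + (delta * i), col) for i in range(1, length - 1)]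
--     else:
--         delta = other_col - col
--         points = [(row, other_col + (delta * i)) for i in range(1, length - 1)]
--
--     return points
-- ===== SOURCE B (Python) =====
-- def _points_along_vector(point, other, length):
--     if point == other:
--         return []
--     row, col = point
--     other_row, other_col = other
--     if row != other_row:
--         step = (other_row - row, 0)
--         cur = (other_row, col)
--     else:
--         step = (0, other_col - col)
--         cur = (row, other_col)
--     points = []
--     n = length - 2
--     i = 0
--     while i < n:
--         cur = (cur[0] + step[0], cur[1] + step[1])
--         points.append(cur)
--         i += 1
--     return points
-- ===== Notes on version B (the rewrite author's own statement) =====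
-- stated objective: alternative
-- what changed: Replaces the index-multiplication list comprehension (other+delta*i for i in range) by a single direction-step vector and a running accumulator point that is advanced additively in a while loop.
import Mathlib
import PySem

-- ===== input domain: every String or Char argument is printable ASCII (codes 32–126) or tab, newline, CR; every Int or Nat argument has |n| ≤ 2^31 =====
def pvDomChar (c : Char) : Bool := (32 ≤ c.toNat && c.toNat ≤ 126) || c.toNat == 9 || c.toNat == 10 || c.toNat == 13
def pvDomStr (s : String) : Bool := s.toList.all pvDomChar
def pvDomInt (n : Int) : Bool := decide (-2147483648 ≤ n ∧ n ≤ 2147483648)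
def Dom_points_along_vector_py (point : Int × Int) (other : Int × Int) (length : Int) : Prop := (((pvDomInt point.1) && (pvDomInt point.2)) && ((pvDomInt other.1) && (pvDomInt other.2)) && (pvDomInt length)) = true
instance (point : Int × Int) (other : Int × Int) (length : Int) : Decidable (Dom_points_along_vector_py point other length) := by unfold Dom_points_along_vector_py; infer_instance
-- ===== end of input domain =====

-- B replaces A's index-multiplication comprehension by a direction-step vector and a
-- running accumulator point advanced additively in a loop (alternative decomposition, same cost).


-- ===== PORT A =====
def points_along_vector_py (point : Int × Int) (other : Int × Int) (length : Int) : List (Int × Int) :=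
  let row := point.1
  let col := point.2
  let other_row := other.1
  let other_col := other.2
  if point = other then []
  else if row ≠ other_row then
    let delta := other_row - row
    (PySem.List.pyRange 1 (length - 1) 1).map (fun i => (other_row + delta * i, col))
  else
    let delta := other_col - col
    (PySem.List.pyRange 1 (length - 1) 1).map (fun i => (row, other_col + delta * i))

-- ===== PORT B =====
-- the while loop: n iterations, each advancing cur by step and appending the new point
def pvAltLoop (step : Int × Int) (cur : Int × Int) : Nat → List (Int × Int)
  | 0 => []
  | n + 1 =>
    let nxt := (cur.1 + step.1, cur.2 + step.2)
    nxt :: pvAltLoop step nxt n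

def points_along_vector_py_alt (point : Int × Int) (other : Int × Int) (length : Int) : List (Int × Int) :=
  if point = other then []
  else
    let sc :=
      if point.1 ≠ other.1 then ((other.1 - point.1, (0 : Int)), (other.1, point.2))
      else (((0 : Int), other.2 - point.2), (point.1, other.2))
    pvAltLoop sc.1 sc.2 (length - 2).toNat

-- ===== PRECONDITION & SPEC =====
def Spec_points_along_vector_py (point : Int × Int) (other : Int × Int) (length : Int) (out : List (Int × Int)) : Prop := out = points_along_vector_py_alt point other length
instance (point : Int × Int) (other : Int × Int) (length : Int) (out : List (Int × Int)) : Decidable (Spec_points_along_vector_py point other length out) := by unfold Spec_points_along_vector_py; infer_instance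

-- ===== CLAIM (what is proved, stated in full; the proofs are below) =====
def Claim_equal_points_along_vector_py : Prop := ∀ (point : Int × Int) (other : Int × Int) (length : Int), Dom_points_along_vector_py point other length → Spec_points_along_vector_py point other length (points_along_vector_py point other length)

-- ===== LEMMAS AND PROOFS =====

theorem pvAltLoop_eq_map (step cur : Int × Int) (n : Nat) :
    pvAltLoop step cur n =
      (List.range n).map (fun (k : Nat) =>
        ((cur.1 + step.1 * ((k : Int) + 1), cur.2 + step.2 * ((k : Int) + 1)) : Int × Int)) := by
  induction n generalizing cur with
  | zero => simp [pvAltLoop]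
  | succ n ih =>
    rw [List.range_succ_eq_map]
    simp only [pvAltLoop, ih, List.map_cons, List.map_map]
    refine congrArg₂ _ ?_ ?_
    · simp
    · apply List.map_congr_left
      intro k _
      simp only [Function.comp]
      refine Prod.ext ?_ ?_ <;> push_cast <;> ring

theorem points_along_vector_py_spec : Claim_equal_points_along_vector_py := by
  intro point other length _
  show points_along_vector_py point other length = points_along_vector_py_alt point other length
  unfold points_along_vector_py points_along_vector_py_alt
  by_cases h : point = other
  · simp [h]
  · simp only [if_neg h]
    have h2 : length - 1 - 1 = length - 2 := by ring
    by_cases hrow : point.1 ≠ other.1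
    · rw [if_pos hrow, if_pos hrow, PySem.List.pyRange_one, h2, pvAltLoop_eq_map, List.map_map]
      apply List.map_congr_left
      intro k _
      simp only [Function.comp]
      refine Prod.ext ?_ ?_ <;> push_cast <;> ring
    · rw [if_neg hrow, if_neg hrow, PySem.List.pyRange_one, h2, pvAltLoop_eq_map, List.map_map]
      apply List.map_congr_left
      intro k _
      simp only [Function.comp]
      refine Prod.ext ?_ ?_ <;> push_cast <;> ring
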